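-- pv_equiv track=rewrite | github.com/Mad-God/2048Game | 2048Gui.py | zeroahead
-- ===== SOURCE A (Python) =====
-- def zeroahead(lst):
--     x = 0
--     for i in range(len(lst)):
--         if lst[i] == 0:
--             x+=1
--         else:
--             if x > 0:
--                 return 1
--     return 0
-- ===== SOURCE B (Python) =====
-- def zeroahead(lst):
--     if 0 not in lst:
--         return 0
--     i = lst.index(0)
--     return 1 if any(v != 0 for v in lst[i + 1:]) else 0
-- ===== Notes on version B (the rewrite author's own statement) =====
-- stated objective: simpler
-- what changed: Replaces A's single stateful counter-flag loop by a two-step decomposition: locate the first zero with list.index, then scan only the tail after it with any(); no running counter is maintained.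
import Mathlib
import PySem

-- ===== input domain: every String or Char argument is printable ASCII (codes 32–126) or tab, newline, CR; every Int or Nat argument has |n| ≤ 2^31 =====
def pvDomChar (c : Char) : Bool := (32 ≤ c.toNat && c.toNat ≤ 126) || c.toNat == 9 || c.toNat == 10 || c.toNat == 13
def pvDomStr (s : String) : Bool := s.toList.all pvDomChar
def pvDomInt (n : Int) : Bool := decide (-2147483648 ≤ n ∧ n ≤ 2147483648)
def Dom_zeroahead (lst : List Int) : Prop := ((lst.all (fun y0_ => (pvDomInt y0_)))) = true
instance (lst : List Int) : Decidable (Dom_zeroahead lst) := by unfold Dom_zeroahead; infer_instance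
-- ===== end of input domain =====

-- B replaces A's stateful counter-flag loop by: find the first zero with index, then scan the tail after it (simpler decomposition, same O(n) cost).

-- ===== PORT A =====
-- A's loop: counter x of zeros seen so far; on a nonzero element with x > 0 return 1; fall off the end with 0.
def zeroaheadGo : List Int → Int → Int
  | [], _ => 0
  | a :: t, x => if a = 0 then zeroaheadGo t (x + 1) else if x > 0 then 1 else zeroaheadGo t x

def zeroahead (lst : List Int) : Int := zeroaheadGo lst 0

-- ===== PORT B =====
def zeroahead_alt (lst : List Int) : Int :=
  if (0 : Int) ∈ lst then
    match PySem.List.index? lst (0 : Int) with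
    | some i => if (PySem.List.slice lst (some ((i : Int) + 1)) none).any (fun v => v ≠ 0) then 1 else 0
    | none => 0
  else 0

-- ===== PRECONDITION & SPEC =====
def Spec_zeroahead (lst : List Int) (out : Int) : Prop := out = zeroahead_alt lst
instance (lst : List Int) (out : Int) : Decidable (Spec_zeroahead lst out) := by unfold Spec_zeroahead; infer_instance

-- ===== CLAIM (what is proved, stated in full; the proofs are below) =====
def Claim_equal_zeroahead : Prop := ∀ (lst : List Int), Dom_zeroahead lst → Spec_zeroahead lst (zeroahead lst)

-- ===== LEMMAS AND PROOFS =====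

-- Once a zero has been seen (x > 0), A's loop returns 1 exactly when some later element is nonzero.
theorem zeroaheadGo_pos (t : List Int) (x : Int) (hx : 0 < x) :
    zeroaheadGo t x = if t.any (fun v => v ≠ 0) then 1 else 0 := by
  induction t generalizing x with
  | nil => simp [zeroaheadGo]
  | cons a t ih =>
    by_cases ha : a = 0
    · simp [zeroaheadGo, ha, ih (x + 1) (by omega)]
    · simp [zeroaheadGo, ha, hx]

theorem alt_cons_ne (a : Int) (t : List Int) (ha : a ≠ 0) :
    zeroahead_alt (a :: t) = zeroahead_alt t := by
  by_cases hm : (0 : Int) ∈ t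
  · obtain ⟨i, hi⟩ := Option.isSome_iff_exists.mp
      ((PySem.List.index?_isSome_iff t (0 : Int)).2 hm)
    have hidx : PySem.List.index? (a :: t) (0 : Int) = some (i + 1) := by
      rw [PySem.List.index?_cons_of_ne t ha, hi]; rfl
    have h1 : PySem.List.slice (a :: t) (some ((i + 1 : Nat) + 1 : Int)) none = t.drop (i + 1) := by
      have h := PySem.List.slice_from_natCast (a :: t) (i + 2)
      have hcast : (((i + 1 : Nat) : Int) + 1) = ((i + 2 : Nat) : Int) := by push_cast; ring
      rw [hcast, h]
      simp [List.drop_succ_cons]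
    have h2 : PySem.List.slice t (some ((i : Nat) + 1 : Int)) none = t.drop (i + 1) := by
      have h := PySem.List.slice_from_natCast t (i + 1)
      have hcast : (((i : Nat) : Int) + 1) = ((i + 1 : Nat) : Int) := by push_cast; ring
      rw [hcast, h]
    rw [zeroahead_alt, zeroahead_alt, if_pos (by simp [hm]), if_pos hm, hidx, hi]
    dsimp only
    rw [h1, h2]
  · have hm' : (0 : Int) ∉ a :: t := by simp [hm, Ne.symm ha]
    rw [zeroahead_alt, zeroahead_alt, if_neg hm', if_neg hm]

theorem zeroaheadGo_zero_eq_alt (lst : List Int) : zeroaheadGo lst 0 = zeroahead_alt lst := by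
  induction lst with
  | nil => simp [zeroaheadGo, zeroahead_alt]
  | cons a t ih =>
    by_cases ha : a = 0
    · subst ha
      have hone : (0 : Int) < 1 := by norm_num
      have hpos := zeroaheadGo_pos t 1 hone
      have hslice : PySem.List.slice ((0 : Int) :: t) (some (1 : Int)) none = t := by
        have h := PySem.List.slice_from_natCast ((0 : Int) :: t) 1
        have hcast : ((1 : Nat) : Int) = (1 : Int) := by norm_num
        rw [hcast] at h
        rw [h]; rfl
      rw [zeroahead_alt, if_pos (by simp), PySem.List.index?_cons_self]
      dsimp only
      rw [show (((0 : Nat) : Int) + 1) = (1 : Int) by norm_num, hslice,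
        show zeroaheadGo ((0 : Int) :: t) 0 = zeroaheadGo t 1 by simp [zeroaheadGo], hpos]
    · rw [show zeroaheadGo (a :: t) 0 = zeroaheadGo t 0 by simp [zeroaheadGo, ha], ih,
        alt_cons_ne a t ha]

-- ===== VERDICT (by name: the statement is the Claim_ definition above) =====
theorem zeroahead_spec : Claim_equal_zeroahead := by
  intro lst _
  unfold Spec_zeroahead zeroahead
  exact zeroaheadGo_zero_eq_alt lst
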